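-- pv_equiv track=rewrite | github.com/coledavid/ENGR467_OS_Remade | Scheduler_EDF_UnitTime.py | adjust_final_output_for_preemption
-- ===== SOURCE A (Python) =====
-- def adjust_final_output_for_preemption(final_output):
--     adjusted_output = []
--
--     for task_output in final_output:
--         task_id, start_time, end_time, p_state = task_output
--         segments = [(start_time, end_time)]
--
--         for prev_task_output in adjusted_output:
--             prev_task_id, prev_start_time, prev_end_time, prev_p_state = prev_task_output
--             new_segments = []
--
--             for seg_start, seg_end in segments:
--                 if prev_start_time < seg_end and prev_end_time > seg_start:
--                     if seg_start < prev_start_time: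
--                         new_segments.append((seg_start, prev_start_time))
--                     if seg_end > prev_end_time:
--                         new_segments.append((prev_end_time, seg_end))
--                 else:
--                     new_segments.append((seg_start, seg_end))
--
--             segments = new_segments
--
--         for seg_start, seg_end in segments:
--             adjusted_output.append([task_id, seg_start, seg_end, p_state])
--
--     return adjusted_output
-- ===== SOURCE B (Python) =====
-- def adjust_final_output_for_preemption(final_output):
--     adjusted_output = []
--     claimed = []  # (start, end) of every row already in adjusted_output, in order
--     for task_id, start_time, end_time, p_state in final_output:
--         # depth-first carve of (start_time, end_time) against the claimed list,
--         # with an explicit stack; entries are (seg_start, seg_end, next claimed index)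
--         segments = []
--         stack = [(start_time, end_time, 0)]
--         while stack:
--             a, b, i = stack.pop()
--             if i == len(claimed):
--                 segments.append((a, b))
--                 continue
--             ps, pe = claimed[i]
--             if ps < b and pe > a:
--                 if b > pe:
--                     stack.append((pe, b, i + 1))
--                 if a < ps:
--                     stack.append((a, ps, i + 1))
--             else:
--                 stack.append((a, b, i + 1))
--         for a, b in segments:
--             adjusted_output.append([task_id, a, b, p_state])
--         claimed.extend(segments)
--     return adjusted_output
-- ===== Notes on version B (the rewrite author's own statement) =====
-- stated objective: alternative
-- what changed: A repeatedly rebuilds the whole segment list in a fresh pass per previously emitted row; B maintains the claimed (start,end) pairs separately and carves each task's interval with a single explicit-stack depth-first subtraction that prunes a branch as soon as a piece dies.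
import Mathlib
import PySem

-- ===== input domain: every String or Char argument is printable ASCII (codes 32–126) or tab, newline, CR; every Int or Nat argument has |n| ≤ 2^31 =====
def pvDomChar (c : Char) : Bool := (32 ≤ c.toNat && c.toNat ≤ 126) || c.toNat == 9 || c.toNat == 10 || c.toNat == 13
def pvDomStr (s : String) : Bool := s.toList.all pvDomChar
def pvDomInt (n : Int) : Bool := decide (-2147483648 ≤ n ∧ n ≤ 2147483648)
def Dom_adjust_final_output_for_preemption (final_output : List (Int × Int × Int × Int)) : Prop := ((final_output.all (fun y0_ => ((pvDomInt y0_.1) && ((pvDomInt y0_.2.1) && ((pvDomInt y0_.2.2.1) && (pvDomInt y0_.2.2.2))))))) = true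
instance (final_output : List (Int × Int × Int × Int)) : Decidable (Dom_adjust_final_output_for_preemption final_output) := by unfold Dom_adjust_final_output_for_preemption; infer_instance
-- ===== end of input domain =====

-- B replaces A's "rebuild the whole segment list once per previous output row" nested passes by a
-- per-task depth-first carve (explicit stack over a separately maintained claimed list); objective:
-- alternative structure, same results.

-- ===== PORT A =====
-- Python unpacks each previous output row [id, start, end, state]; rows always have length 4,
-- the catch-all is unreachable.
def pvRow (row : List Int) : Int × Int :=
  match row with
  | [_, ps, pe, _] => (ps, pe)
  | _ => (0, 0)

def adjust_final_output_for_preemption (final_output : List (Int × Int × Int × Int)) : List (List Int) :=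
  final_output.foldl (fun adjusted_output t =>
    let task_id := t.1; let start_time := t.2.1; let end_time := t.2.2.1; let p_state := t.2.2.2
    let segments := adjusted_output.foldl (fun segments row =>
        let ps := (pvRow row).1; let pe := (pvRow row).2
        segments.foldl (fun new_segments sg =>
          if ps < sg.2 ∧ pe > sg.1 then
            new_segments ++ ((if sg.1 < ps then [(sg.1, ps)] else []) ++ (if sg.2 > pe then [(pe, sg.2)] else []))
          else new_segments ++ [sg]) []
      ) [(start_time, end_time)]
    segments.foldl (fun acc sg => acc ++ [[task_id, sg.1, sg.2, p_state]]) adjusted_output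
  ) []

-- ===== PORT B =====
-- Explicit-stack DFS carve from Source B; the Python index i into `claimed` is represented by the
-- remaining suffix of the claimed list, the head of the stack list is the top of the stack.
-- pvWeight and the two lemmas below exist only for pvCarve's termination measure.
def pvWeight (cl : List (Int × Int)) : Nat := 3 ^ cl.length

theorem pvWeight_pos (cl : List (Int × Int)) : 0 < pvWeight cl :=
  Nat.pow_pos (by norm_num)

theorem pvWeight_lt_cons (p : Int × Int) (cl : List (Int × Int)) (s : Nat) :
    pvWeight cl + s < pvWeight (p :: cl) + s := by
  have h := pvWeight_pos cl
  simp only [pvWeight, List.length_cons, pow_succ] at *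
  omega

theorem pvWeight_lt_cons2 (p : Int × Int) (cl : List (Int × Int)) (s : Nat) :
    pvWeight cl + (pvWeight cl + s) < pvWeight (p :: cl) + s := by
  have h := pvWeight_pos cl
  simp only [pvWeight, List.length_cons, pow_succ] at *
  omega

theorem pvWeight_lt_add (cl : List (Int × Int)) (s : Nat) :
    s < pvWeight cl + s := by
  have h := pvWeight_pos cl
  omega

def pvCarve : List (Int × Int × List (Int × Int)) → List (Int × Int) → List (Int × Int)
  | [], segments => segments
  | (a, b, cl) :: stack, segments =>
    match cl with
    | [] => pvCarve stack (segments ++ [(a, b)])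
    | (ps, pe) :: rest =>
      if ps < b ∧ pe > a then
        if a < ps then
          if b > pe then pvCarve ((a, ps, rest) :: (pe, b, rest) :: stack) segments
          else pvCarve ((a, ps, rest) :: stack) segments
        else
          if b > pe then pvCarve ((pe, b, rest) :: stack) segments
          else pvCarve stack segments
      else pvCarve ((a, b, rest) :: stack) segments
termination_by stack _ => (stack.map (fun e => pvWeight e.2.2)).sum
decreasing_by
  all_goals simp only [List.map_cons, List.sum_cons]
  all_goals first
    | exact pvWeight_lt_cons2 _ _ _
    | exact pvWeight_lt_cons _ _ _
    | exact pvWeight_lt_add _ _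

def adjust_final_output_for_preemption_alt (final_output : List (Int × Int × Int × Int)) : List (List Int) :=
  (final_output.foldl (fun (st : List (Int × Int) × List (List Int)) t =>
      let segments := pvCarve [(t.2.1, t.2.2.1, st.1)] []
      (st.1 ++ segments,
       segments.foldl (fun acc sg => acc ++ [[t.1, sg.1, sg.2, t.2.2.2]]) st.2)
    ) ([], [])).2

-- ===== PRECONDITION & SPEC =====
def Spec_adjust_final_output_for_preemption (final_output : List (Int × Int × Int × Int)) (out : List (List Int)) : Prop := out = adjust_final_output_for_preemption_alt final_output
instance (final_output : List (Int × Int × Int × Int)) (out : List (List Int)) : Decidable (Spec_adjust_final_output_for_preemption final_output out) := by unfold Spec_adjust_final_output_for_preemption; infer_instance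

-- ===== CLAIM (what is proved, stated in full; the proofs are below) =====
def Claim_equal_adjust_final_output_for_preemption : Prop := ∀ (final_output : List (Int × Int × Int × Int)), Dom_adjust_final_output_for_preemption final_output → Spec_adjust_final_output_for_preemption final_output (adjust_final_output_for_preemption final_output)

-- ===== LEMMAS AND PROOFS =====

-- The recursive (per-segment) form of the subtraction both programs compute.
def pvSub : Int → Int → List (Int × Int) → List (Int × Int)
  | a, b, [] => [(a, b)]
  | a, b, (ps, pe) :: rest =>
    if ps < b ∧ pe > a then
      (if a < ps then pvSub a ps rest else []) ++ (if b > pe then pvSub pe b rest else [])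
    else pvSub a b rest

-- The explicit stack computes pvSub of each stack entry, in order.
theorem pvCarve_eq_flatMap (stack : List (Int × Int × List (Int × Int))) (segments : List (Int × Int)) :
    pvCarve stack segments = segments ++ stack.flatMap (fun e => pvSub e.1 e.2.1 e.2.2) := by
  induction stack, segments using pvCarve.induct <;> simp_all [pvCarve, pvSub] <;>
    (try (split_ifs <;> first | omega | simp_all))

-- One carving pass of A (over one claimed pair), as a flatMap.
def pvSplit (p : Int × Int) (sg : Int × Int) : List (Int × Int) :=
  if p.1 < sg.2 ∧ p.2 > sg.1 then
    (if sg.1 < p.1 then [(sg.1, p.1)] else []) ++ (if sg.2 > p.2 then [(p.2, sg.2)] else [])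
  else [sg]

theorem pvSplit_sub (p sg : Int × Int) (rest : List (Int × Int)) :
    (pvSplit p sg).flatMap (fun s => pvSub s.1 s.2 rest) = pvSub sg.1 sg.2 (p :: rest) := by
  rcases p with ⟨ps, pe⟩; rcases sg with ⟨a, b⟩
  simp only [pvSplit, pvSub]
  split_ifs with hov hl hr hr <;> simp

-- A's sequential fold over the claimed rows equals the per-segment recursion.
theorem foldl_split_eq_sub (adjusted : List (List Int)) :
    ∀ segs : List (Int × Int),
      adjusted.foldl (fun segs row => segs.flatMap (pvSplit (pvRow row))) segs
        = segs.flatMap (fun sg => pvSub sg.1 sg.2 (adjusted.map pvRow)) := by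
  induction adjusted with
  | nil => intro segs; simp [pvSub]
  | cons row rest ih =>
      intro segs
      simp only [List.foldl_cons, ih, List.flatMap_assoc, List.map_cons]
      congr 1; funext sg
      exact pvSplit_sub (pvRow row) sg (rest.map pvRow)

-- A's inner loop body is one pvSplit pass.
theorem innerA_eq (row : List Int) (segs : List (Int × Int)) :
    segs.foldl (fun new_segments sg =>
        if (pvRow row).1 < sg.2 ∧ (pvRow row).2 > sg.1 then
          new_segments ++ ((if sg.1 < (pvRow row).1 then [(sg.1, (pvRow row).1)] else [])
              ++ (if sg.2 > (pvRow row).2 then [((pvRow row).2, sg.2)] else []))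
        else new_segments ++ [sg]) []
      = segs.flatMap (pvSplit (pvRow row)) := by
  have : ∀ acc : List (Int × Int),
      segs.foldl (fun new_segments sg =>
          if (pvRow row).1 < sg.2 ∧ (pvRow row).2 > sg.1 then
            new_segments ++ ((if sg.1 < (pvRow row).1 then [(sg.1, (pvRow row).1)] else [])
                ++ (if sg.2 > (pvRow row).2 then [((pvRow row).2, sg.2)] else []))
          else new_segments ++ [sg]) acc
        = acc ++ segs.flatMap (pvSplit (pvRow row)) := by
    have h := PySem.List.foldl_append_eq_flatMap (l := segs) (g := pvSplit (pvRow row))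
    intro acc
    rw [← h acc]
    apply PySem.List.foldl_congr_mem
    intro acc' sg _
    simp only [pvSplit]
    split_ifs <;> simp
  exact (this []).trans (List.nil_append _)

-- pvRow of an appended output row.
theorem pvRow_append (segs : List (Int × Int)) (tid pst : Int) (adjusted : List (List Int)) :
    (segs.foldl (fun acc sg => acc ++ [[tid, sg.1, sg.2, pst]]) adjusted).map pvRow
      = adjusted.map pvRow ++ segs := by
  induction segs generalizing adjusted with
  | nil => simp
  | cons sg rest ih =>
      rw [List.foldl_cons, ih]
      simp [pvRow]

-- Named forms of the two per-task loop bodies (defeq to the lambdas inside the ports).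
def pvStepA (adjusted_output : List (List Int)) (t : Int × Int × Int × Int) : List (List Int) :=
  let task_id := t.1; let start_time := t.2.1; let end_time := t.2.2.1; let p_state := t.2.2.2
  let segments := adjusted_output.foldl (fun segments row =>
      let ps := (pvRow row).1; let pe := (pvRow row).2
      segments.foldl (fun new_segments sg =>
        if ps < sg.2 ∧ pe > sg.1 then
          new_segments ++ ((if sg.1 < ps then [(sg.1, ps)] else []) ++ (if sg.2 > pe then [(pe, sg.2)] else []))
        else new_segments ++ [sg]) []
    ) [(start_time, end_time)]
  segments.foldl (fun acc sg => acc ++ [[task_id, sg.1, sg.2, p_state]]) adjusted_output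

def pvStepB (st : List (Int × Int) × List (List Int)) (t : Int × Int × Int × Int) :
    List (Int × Int) × List (List Int) :=
  let segments := pvCarve [(t.2.1, t.2.2.1, st.1)] []
  (st.1 ++ segments, segments.foldl (fun acc sg => acc ++ [[t.1, sg.1, sg.2, t.2.2.2]]) st.2)

-- A's per-task segment computation is the per-segment recursion over the claimed pairs.
theorem segA_eq (adjusted : List (List Int)) (a b : Int) :
    adjusted.foldl (fun segments row =>
        let ps := (pvRow row).1; let pe := (pvRow row).2
        segments.foldl (fun new_segments sg =>
          if ps < sg.2 ∧ pe > sg.1 then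
            new_segments ++ ((if sg.1 < ps then [(sg.1, ps)] else []) ++ (if sg.2 > pe then [(pe, sg.2)] else []))
          else new_segments ++ [sg]) []
      ) [(a, b)]
      = pvSub a b (adjusted.map pvRow) := by
  have h1 : adjusted.foldl (fun segments row =>
        let ps := (pvRow row).1; let pe := (pvRow row).2
        segments.foldl (fun new_segments sg =>
          if ps < sg.2 ∧ pe > sg.1 then
            new_segments ++ ((if sg.1 < ps then [(sg.1, ps)] else []) ++ (if sg.2 > pe then [(pe, sg.2)] else []))
          else new_segments ++ [sg]) []
      ) [(a, b)]
      = adjusted.foldl (fun segs row => segs.flatMap (pvSplit (pvRow row))) [(a, b)] := by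
    apply PySem.List.foldl_congr_mem
    intro acc row _
    exact innerA_eq row acc
  rw [h1, foldl_split_eq_sub]
  simp

-- One step of B, started from A's state, is one step of A.
theorem step_eq (t : Int × Int × Int × Int) (adjusted : List (List Int)) :
    pvStepB (adjusted.map pvRow, adjusted) t = ((pvStepA adjusted t).map pvRow, pvStepA adjusted t) := by
  have hB : pvCarve [(t.2.1, t.2.2.1, adjusted.map pvRow)] [] = pvSub t.2.1 t.2.2.1 (adjusted.map pvRow) := by
    rw [pvCarve_eq_flatMap]; simp
  unfold pvStepB pvStepA
  simp only [hB, segA_eq]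
  exact Prod.ext (pvRow_append _ _ _ _).symm rfl

-- Main invariant: B's fold state is (claimed pairs of A's rows, A's rows).
theorem main_inv (fo : List (Int × Int × Int × Int)) :
    ∀ adjusted : List (List Int),
      fo.foldl pvStepB (adjusted.map pvRow, adjusted)
        = ((fo.foldl pvStepA adjusted).map pvRow, fo.foldl pvStepA adjusted) := by
  induction fo with
  | nil => intro adjusted; simp
  | cons t rest ih =>
      intro adjusted
      rw [List.foldl_cons, List.foldl_cons, step_eq, ih]

-- ===== VERDICT (by name: the statement is the Claim_ definition above) =====
theorem adjust_final_output_for_preemption_spec : Claim_equal_adjust_final_output_for_preemption := by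
  intro fo _
  unfold Spec_adjust_final_output_for_preemption
  show fo.foldl pvStepA [] = (fo.foldl pvStepB ([], [])).2
  have h := main_inv fo []
  simp only [List.map_nil] at h
  rw [h]
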